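-- pv_equiv track=rewrite | github.com/1pjmcdonough/python_work | python_projects/reductions.py | validateReduction
-- ===== SOURCE A (Python) =====
-- def reduceOne(firstString, secondString, wordList):
--     '''
--     This function takes in two strings and a list of words
--     as arguments, checks that the two strings are in the word list,
--     checks if the second string is a reduction of the first string,
--     and returns a boolean result.
--     '''
--     wordBank = []
--     firstStringLength = len(firstString)
--
--     if (firstString in wordList and secondString in wordList):
--         for i in range(firstStringLength):
--             reduction = firstString[:i] + firstString[i+1:]
--             wordBank.append(reduction)
--     else:
--         return False
--
--     if secondString in wordBank:
--         return True
--     else: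
--         return False
--
-- def validateReduction(reduction, wordList):
--     '''
--     This function takes in two lists as arguments. It first tests that all the
--     words in the reduction list are also in wordList. It then tests if the
--     reduction list is a valid sequence of reductions. This function returns a
--     boolean result.
--     '''
--     testList = []
--     reductionLength = len(reduction) - 1
--
--     for word in reduction:
--         if word not in wordList:
--             return False
--
--     for i in range(reductionLength):
--         if reduceOne(reduction[i], reduction[i+1], wordList):
--             testList.append(reduction[i])
--
--     # takes both lists and checks if all values are the same up to the last value.
--     # The last values does not need to be checked because the value before it would
--     # not be in the test list if the two words were not reductions
--     if testList[:reductionLength] == reduction[:reductionLength]: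
--         return True
--     else:
--         return False
-- ===== SOURCE B (Python) =====
-- def _isDeletion(a, b):
--     # b is obtained from a by deleting exactly one character:
--     # lengths must differ by one; skip the common prefix, then the rest of a
--     # (minus one char) must equal the rest of b.
--     if len(a) != len(b) + 1:
--         return False
--     i = 0
--     while i < len(b) and a[i] == b[i]:
--         i += 1
--     return a[i+1:] == b[i:]
--
-- def validateReduction(reduction, wordList):
--     words = set(wordList)
--     for word in reduction:
--         if word not in words:
--             return False
--     return all(_isDeletion(a, b) for a, b in zip(reduction, reduction[1:]))
-- ===== Notes on version B (the rewrite author's own statement) =====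
-- stated objective: faster
-- what changed: Replaces per-pair enumeration of every one-character deletion of the longer word (plus the testList prefix-comparison trick) with a direct two-pointer single-deletion check on each consecutive pair, and replaces the repeated list membership scans with one prebuilt set.
import Mathlib
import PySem

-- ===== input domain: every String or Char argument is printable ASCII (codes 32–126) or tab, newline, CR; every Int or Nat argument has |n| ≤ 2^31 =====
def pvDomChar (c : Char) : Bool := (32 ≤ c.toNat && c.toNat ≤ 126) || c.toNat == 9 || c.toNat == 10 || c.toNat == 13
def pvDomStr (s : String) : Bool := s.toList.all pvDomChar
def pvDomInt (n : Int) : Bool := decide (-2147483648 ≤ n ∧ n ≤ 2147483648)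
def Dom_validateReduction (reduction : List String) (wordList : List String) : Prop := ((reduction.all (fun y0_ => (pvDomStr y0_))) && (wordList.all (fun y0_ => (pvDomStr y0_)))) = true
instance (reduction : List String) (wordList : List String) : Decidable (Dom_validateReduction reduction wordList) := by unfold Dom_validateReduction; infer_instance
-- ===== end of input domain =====

-- B replaces A's per-pair enumeration of all one-character deletions (and the testList
-- prefix-comparison) with a direct two-pointer single-deletion check per consecutive pair,
-- and one prebuilt set for the membership test (objective: faster).


-- ===== PORT A =====
-- string slicing/concatenation is ported on the char-list side (exact: Python str equality
-- is char-sequence equality); wordBank holds the deletion strings as char lists.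
def reduceOne (firstString : String) (secondString : String) (wordList : List String) : Bool :=
  let firstStringLength : Int := PySem.Str.len firstString
  if wordList.contains firstString && wordList.contains secondString then
    let wordBank : List (List Char) :=
      (PySem.List.pyRange 0 firstStringLength).foldl
        (fun acc i =>
          acc ++ [PySem.List.slice firstString.toList none (some i) ++
                  PySem.List.slice firstString.toList (some (i + 1)) none]) []
    wordBank.contains secondString.toList
  else
    false

def validateReduction (reduction : List String) (wordList : List String) : Bool :=
  let reductionLength : Int := (reduction.length : Int) - 1
  -- 'for word in reduction: if word not in wordList: return False'
  if reduction.any (fun word => !wordList.contains word) then false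
  else
    let testList : List String :=
      (PySem.List.pyRange 0 reductionLength).foldl
        (fun acc i =>
          if reduceOne (PySem.List.pyGetD reduction i "") (PySem.List.pyGetD reduction (i + 1) "") wordList
          then acc ++ [PySem.List.pyGetD reduction i ""] else acc) []
    PySem.List.slice testList none (some reductionLength) ==
      PySem.List.slice reduction none (some reductionLength)

-- ===== PORT B =====
-- the while loop of _isDeletion (skip common prefix, then compare a[i+1:] with b[i:])
-- as structural recursion on the two char lists; the '[], _' base is unreachable when
-- the length guard holds.
def delScan : List Char → List Char → Bool
  | [], _ => false
  | _ :: xs, [] => decide (xs = [])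
  | x :: xs, y :: ys => if x == y then delScan xs ys else decide (xs = y :: ys)

def isDeletion (a : String) (b : String) : Bool :=
  if PySem.Str.len a ≠ PySem.Str.len b + 1 then false
  else delScan a.toList b.toList

def validateReduction_alt (reduction : List String) (wordList : List String) : Bool :=
  let words : PySem.Set String := PySem.Set.ofList wordList
  if reduction.any (fun word => !PySem.Set.contains words word) then false
  else (reduction.zip (PySem.List.slice reduction (some 1) none)).all
        (fun p => isDeletion p.1 p.2)

-- ===== PRECONDITION & SPEC =====
def Spec_validateReduction (reduction : List String) (wordList : List String) (out : Bool) : Prop := out = validateReduction_alt reduction wordList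
instance (reduction : List String) (wordList : List String) (out : Bool) : Decidable (Spec_validateReduction reduction wordList out) := by unfold Spec_validateReduction; infer_instance

-- ===== CLAIM (what is proved, stated in full; the proofs are below) =====
def Claim_equal_validateReduction : Prop := ∀ (reduction : List String) (wordList : List String), Dom_validateReduction reduction wordList → Spec_validateReduction reduction wordList (validateReduction reduction wordList)

-- ===== LEMMAS AND PROOFS =====

-- the crux: the two-pointer scan accepts (together with the length condition) exactly the
-- one-character deletions A enumerates.
theorem delScan_iff_delete (as : List Char) : ∀ (bs : List Char),
    (∃ i < as.length, bs = as.take i ++ as.drop (i + 1)) ↔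
      (as.length = bs.length + 1 ∧ delScan as bs = true) := by
  induction as with
  | nil =>
    intro bs
    simp [delScan]
  | cons x xs ih =>
    intro bs
    cases bs with
    | nil =>
      simp only [delScan, List.length_cons, List.length_nil,
        decide_eq_true_eq]
      constructor
      · rintro ⟨i, hi, h⟩
        cases i with
        | zero =>
          simp at h
          simp [← h]
        | succ k => simp at h
      · rintro ⟨h1, h2⟩
        exact ⟨0, by omega, by simp [h2]⟩
    | cons y ys =>
      by_cases hxy : x = y
      · subst hxy
        have hscan : delScan (x :: xs) (x :: ys) = delScan xs ys := by
          simp [delScan]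
        rw [hscan]
        constructor
        · rintro ⟨i, hi, h⟩
          cases i with
          | zero =>
            simp at h
            have hxs : xs = x :: ys := h.symm
            refine ⟨by simp [hxs], ?_⟩
            have : (∃ j < xs.length, ys = xs.take j ++ xs.drop (j + 1)) := by
              exact ⟨0, by simp [hxs], by simp [hxs]⟩
            exact ((ih ys).mp this).2
          | succ k =>
            simp only [List.take_succ_cons, List.drop_succ_cons, List.cons_append,
              List.cons.injEq] at h
            have : (∃ j < xs.length, ys = xs.take j ++ xs.drop (j + 1)) :=
              ⟨k, by simpa using hi, h.2⟩
            have h2 := (ih ys).mp this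
            exact ⟨by simp [h2.1], h2.2⟩
        · rintro ⟨hlen, hscan'⟩
          have hlen' : xs.length = ys.length + 1 := by simpa using hlen
          have := (ih ys).mpr ⟨hlen', hscan'⟩
          obtain ⟨j, hj, h⟩ := this
          exact ⟨j + 1, by simpa using Nat.succ_lt_succ hj, by simp [h]⟩
      · have hscan : delScan (x :: xs) (y :: ys) = decide (xs = y :: ys) := by
          simp [delScan, hxy]
        rw [hscan]
        constructor
        · rintro ⟨i, hi, h⟩
          cases i with
          | zero =>
            simp at h
            refine ⟨by simp [← h], by simp [← h]⟩
          | succ k =>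
            simp only [List.take_succ_cons, List.drop_succ_cons, List.cons_append,
              List.cons.injEq] at h
            exact absurd h.1.symm hxy
        · rintro ⟨hlen, h⟩
          simp only [decide_eq_true_eq] at h
          exact ⟨0, by simp [h], by simp [h.symm]⟩

-- pairwise: given both words are in wordList, A's reduceOne is B's isDeletion
theorem reduceOne_eq_isDeletion (a b : String) (wl : List String)
    (ha : wl.contains a = true) (hb : wl.contains b = true) :
    reduceOne a b wl = isDeletion a b := by
  unfold reduceOne isDeletion
  rw [PySem.Str.len_eq, PySem.Str.len_eq, ha, hb]
  simp only [Bool.and_self, if_true]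
  rw [PySem.List.foldl_append_singleton_eq_map
    (f := fun i => PySem.List.slice a.toList none (some i) ++
                   PySem.List.slice a.toList (some (i + 1)) none)]
  rw [Bool.eq_iff_iff]
  rw [List.contains_iff_mem, List.nil_append, List.mem_map]
  constructor
  · rintro ⟨i, hi, h⟩
    rw [PySem.List.mem_pyRange_one] at hi
    rw [PySem.List.slice_to a.toList hi.1, PySem.List.slice_from a.toList (by omega : (0:Int) ≤ i + 1)] at h
    have hdel : ∃ j < a.toList.length, b.toList = a.toList.take j ++ a.toList.drop (j + 1) := by
      refine ⟨i.toNat, by omega, ?_⟩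
      have : (i + 1).toNat = i.toNat + 1 := by omega
      rw [this] at h
      exact h.symm
    have h2 := (delScan_iff_delete a.toList b.toList).mp hdel
    split
    · omega
    · exact h2.2
  · intro h
    split at h
    · exact absurd h (by simp)
    · rename_i hlen
      have hlen' : a.toList.length = b.toList.length + 1 := by omega
      obtain ⟨j, hj, hdel⟩ := (delScan_iff_delete a.toList b.toList).mpr ⟨hlen', h⟩
      refine ⟨(j : Int), ?_, ?_⟩
      · rw [PySem.List.mem_pyRange_one]
        constructor
        · exact Int.natCast_nonneg j
        · omega
      · rw [PySem.List.slice_to a.toList (Int.natCast_nonneg j),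
          PySem.List.slice_from a.toList (by omega : (0:Int) ≤ (j:Int) + 1)]
        have h1 : ((j : Int)).toNat = j := by omega
        have h2 : ((j : Int) + 1).toNat = j + 1 := by omega
        rw [h1, h2]
        exact hdel.symm

-- B's zip-with-tail pass, re-indexed as an all over range (for comparison with A's index loop)
theorem zip_tail_all (f : String → String → Bool) : ∀ (l : List String),
    (l.zip l.tail).all (fun p => f p.1 p.2) =
      (List.range (l.length - 1)).all (fun k => f (l.getD k "") (l.getD (k + 1) "")) := by
  intro l
  induction l with
  | nil => simp
  | cons x t ih =>
    cases t with
    | nil => simp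
    | cons y t' =>
      have ihy := ih
      simp only [List.tail_cons, List.zip_cons_cons, List.all_cons, List.length_cons,
        Nat.add_sub_cancel] at *
      rw [List.range_succ_eq_map, List.all_cons, List.all_map]
      simp only [List.getD_cons_zero, List.getD_cons_succ]
      rw [ihy]
      rfl

-- A's filter-then-prefix-compare equals the all-pairs test
theorem take_eq_iff_all (r : List String) (P : Nat → Bool) (m : Nat) (hm : m + 1 = r.length) :
    ((((List.range m).filter P).map (fun k => r.getD k "")).take m == r.take m) =
      (List.range m).all P := by
  rw [Bool.eq_iff_iff, beq_iff_eq, List.all_eq_true]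
  constructor
  · intro h k hk
    by_contra hP
    have hfl : ((List.range m).filter P).length < m := by
      have hle : ((List.range m).filter P).length ≤ m := by
        simpa using List.length_filter_le P (List.range m)
      rcases Nat.lt_or_ge (((List.range m).filter P).length) m with h' | h'
      · exact h'
      · exfalso
        have heq : (List.range m).filter P = List.range m :=
          List.Sublist.eq_of_length List.filter_sublist (by simp; omega)
        have hk' : k ∈ (List.range m).filter P := by rw [heq]; exact hk
        rw [List.mem_filter] at hk'
        exact hP hk'.2
    have hlen1 : ((((List.range m).filter P).map (fun k => r.getD k "")).take m).length =
        ((List.range m).filter P).length := by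
      rw [List.length_take, List.length_map]
      omega
    have hlen2 : (r.take m).length = m := by
      rw [List.length_take]
      omega
    have := congrArg List.length h
    rw [hlen1, hlen2] at this
    omega
  · intro h
    have hfilter : (List.range m).filter P = List.range m := by
      rw [List.filter_eq_self]
      intro k hk
      exact h k hk
    rw [hfilter]
    have hmap : (List.range m).map (fun k => r.getD k "") = r.take m := by
      apply List.ext_getElem
      · simp; omega
      · intro i h1 h2
        simp only [List.getElem_map, List.getElem_range, List.getElem_take]
        rw [List.getD_eq_getElem r "" (by simp at h1; omega)]
    rw [hmap, List.take_take, Nat.min_self]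

-- ===== VERDICT (by name: the statement is the Claim_ definition above) =====
theorem validateReduction_spec : Claim_equal_validateReduction := by
  intro reduction wordList _
  unfold Spec_validateReduction
  unfold validateReduction validateReduction_alt
  simp only []
  have hguard : (reduction.any fun word => !PySem.Set.contains (PySem.Set.ofList wordList) word)
      = (reduction.any fun word => !wordList.contains word) := by
    apply PySem.List.any_congr_mem
    intro w _
    have : PySem.Set.contains (PySem.Set.ofList wordList) w = wordList.contains w := by
      rw [Bool.eq_iff_iff]
      simp [PySem.Set.contains, PySem.Set.mem_ofList]
    rw [this]
  rw [hguard]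
  by_cases hg : (reduction.any fun word => !wordList.contains word) = true
  · rw [hg]
    rw [if_pos rfl, if_pos rfl]
  · rw [Bool.not_eq_true] at hg
    simp only [hg, Bool.false_eq_true, if_false]
    have hmem : ∀ w ∈ reduction, wordList.contains w = true := by
      intro w hw
      have := List.any_eq_false.mp hg w hw
      simpa using this
    rw [PySem.List.slice_from_one]
    cases hr : reduction with
    | nil => simp [PySem.List.pyRange, PySem.List.slice]
    | cons r0 rs =>
      rw [← hr]
      have hn : 1 ≤ reduction.length := by rw [hr]; simp
      set n := reduction.length with hnd
      have hcast : (n : Int) - 1 = ((n - 1 : Nat) : Int) := by omega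
      rw [hcast, PySem.List.pyRange_zero_nat]
      set m := n - 1 with hmd
      rw [List.foldl_map]
      have hfold : List.foldl
          (fun (acc : List String) (k : Nat) =>
            if reduceOne (PySem.List.pyGetD reduction (k : Int) "") (PySem.List.pyGetD reduction ((k : Int) + 1) "") wordList
            then acc ++ [PySem.List.pyGetD reduction (k : Int) ""] else acc) [] (List.range m) =
        List.foldl
          (fun (acc : List String) (k : Nat) =>
            if reduceOne (reduction.getD k "") (reduction.getD (k + 1) "") wordList
            then acc ++ [reduction.getD k ""] else acc) [] (List.range m) := by
        apply PySem.List.foldl_congr_mem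
        intro acc k _
        have h1 : ((k : Int) + 1) = ((k + 1 : Nat) : Int) := by omega
        simp only [h1, PySem.List.pyGetD_natCast]
      rw [hfold]
      rw [PySem.List.foldl_append_if
        (p := fun k => reduceOne (reduction.getD k "") (reduction.getD (k + 1) "") wordList)
        (f := fun k => reduction.getD k "")]
      rw [List.nil_append]
      have hm0 : (0 : Int) ≤ ((m : Nat) : Int) := Int.natCast_nonneg m
      rw [← hcast]
      rw [PySem.List.slice_to _ (by omega : (0:Int) ≤ (n : Int) - 1),
          PySem.List.slice_to _ (by omega : (0:Int) ≤ (n : Int) - 1)]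
      have htn : ((n : Int) - 1).toNat = m := by omega
      rw [htn]
      rw [take_eq_iff_all reduction _ m (by omega)]
      rw [zip_tail_all]
      have hml : reduction.length - 1 = m := by omega
      rw [hml]
      rw [Bool.eq_iff_iff, List.all_eq_true, List.all_eq_true]
      have hpt : ∀ k ∈ List.range m,
          (reduceOne (reduction.getD k "") (reduction.getD (k + 1) "") wordList) =
            isDeletion (reduction.getD k "") (reduction.getD (k + 1) "") := by
        intro k hk
        rw [List.mem_range] at hk
        have hk1 : k < n := by omega
        have hk2 : k + 1 < n := by omega
        have m1 : reduction.getD k "" ∈ reduction := by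
          rw [List.getD_eq_getElem reduction "" hk1]; exact List.getElem_mem hk1
        have m2 : reduction.getD (k + 1) "" ∈ reduction := by
          rw [List.getD_eq_getElem reduction "" hk2]; exact List.getElem_mem hk2
        exact reduceOne_eq_isDeletion _ _ _ (hmem _ m1) (hmem _ m2)
      constructor
      · intro h k hk
        rw [← hpt k hk]
        exact h k hk
      · intro h k hk
        rw [hpt k hk]
        exact h k hk
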